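-- pv_equiv track=rewrite | github.com/pbielik/diplomovka | tools/ai-tools/doc_to_markdown.py | trim_empty_table
-- ===== SOURCE A (Python) =====
-- def trim_empty_table(rows: list[list[str]]) -> list[list[str]]:
--     while rows and all(not cell.strip() for cell in rows[-1]):
--         rows.pop()
--     if not rows:
--         return rows
--     max_width = max(len(row) for row in rows)
--     for row in rows:
--         row.extend([""] * (max_width - len(row)))
--     while max_width > 0 and all(not row[max_width - 1].strip() for row in rows):
--         for row in rows:
--             row.pop()
--         max_width -= 1
--     return rows
-- ===== SOURCE B (Python) =====
-- def trim_empty_table(rows: list[list[str]]) -> list[list[str]]: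
--     # forward scan: number of rows up to and including the last non-blank row
--     nrows = 0
--     for i, row in enumerate(rows):
--         if any(c.strip() for c in row):
--             nrows = i + 1
--     del rows[nrows:]
--     if not rows:
--         return rows
--     # forward scan: final width = 1 + largest column index holding a non-blank cell
--     w = 0
--     for row in rows:
--         for j, c in enumerate(row):
--             if c.strip():
--                 w = max(w, j + 1)
--     # reshape every row in place to exactly w cells
--     for row in rows:
--         row[:] = row[:w] + [""] * (w - len(row))
--     return rows
-- ===== Notes on version B (the rewrite author's own statement) =====
-- stated objective: alternative
-- what changed: Replaces A's two while-pop loops (pop trailing blank rows, then pad all rows and repeatedly pop the last column while blank) with two forward scans that compute the final row count and final width directly, followed by a single reshape of each row.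
import Mathlib
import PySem

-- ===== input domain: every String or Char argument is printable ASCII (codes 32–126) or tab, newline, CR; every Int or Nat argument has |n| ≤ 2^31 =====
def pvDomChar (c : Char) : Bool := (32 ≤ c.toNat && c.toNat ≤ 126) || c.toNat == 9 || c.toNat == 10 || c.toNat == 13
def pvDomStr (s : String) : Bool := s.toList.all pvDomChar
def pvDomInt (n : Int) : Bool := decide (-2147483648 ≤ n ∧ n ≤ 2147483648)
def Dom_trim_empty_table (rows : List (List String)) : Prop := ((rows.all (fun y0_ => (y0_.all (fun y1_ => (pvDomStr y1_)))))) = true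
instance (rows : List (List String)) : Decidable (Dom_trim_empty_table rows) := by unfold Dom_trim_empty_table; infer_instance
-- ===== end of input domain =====

-- B replaces A's two while-pop trimming loops by forward scans computing the final
-- row count and width, then one reshape per row (same result; A/B also mutate the
-- Python argument in place — the equivalence proved here is about the return value).


-- ===== PORT A =====
-- `all(not cell.strip() for cell in row)`
def pvBlankRow (row : List String) : Bool := row.all (fun cell => PySem.Str.strip cell == "")

-- `while rows and all(not cell.strip() for cell in rows[-1]): rows.pop()`
def pvTrimRowsA (rows : List (List String)) : List (List String) :=
  if rows.isEmpty then rows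
  else if pvBlankRow (rows.getLastD []) then pvTrimRowsA rows.dropLast
  else rows
termination_by rows.length
decreasing_by
  simp [List.isEmpty_iff] at *
  have : rows.length ≠ 0 := by simpa [List.length_eq_zero_iff] using ‹rows ≠ []›
  simp [List.length_dropLast]; omega

-- `while max_width > 0 and all(not row[max_width-1].strip() for row in rows): pop last column`
-- (row[max_width-1] is in range here — every row has length max_width — so getD is exact)
def pvColLoop : Nat → List (List String) → List (List String)
  | 0, rows => rows
  | w + 1, rows =>
    if rows.all (fun row => PySem.Str.strip (row.getD w "") == "") then
      pvColLoop w (rows.map List.dropLast)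
    else rows

def trim_empty_table (rows : List (List String)) : List (List String) :=
  let rows1 := pvTrimRowsA rows
  if rows1.isEmpty then rows1
  else
    let maxWidth := (rows1.map List.length).foldl max 0
    let rows2 := rows1.map (fun row => row ++ List.replicate (maxWidth - row.length) "")
    pvColLoop maxWidth rows2

-- ===== PORT B =====
-- `c.strip()` truthiness
def pvNonBlank (c : String) : Bool := PySem.Str.strip c != ""

-- `nrows = 0; for i, row in enumerate(rows): if any(...): nrows = i + 1`  (state = (i, nrows))
def pvNRows (rows : List (List String)) : Nat :=
  (rows.foldl (fun (p : Nat × Nat) row =>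
      (p.1 + 1, if row.any pvNonBlank then p.1 + 1 else p.2)) (0, 0)).2

-- `w = 0; for row in rows: for j, c in enumerate(row): if c.strip(): w = max(w, j+1)`
def pvWidth (rows : List (List String)) : Nat :=
  rows.foldl (fun w row =>
    (row.foldl (fun (p : Nat × Nat) c =>
        (p.1 + 1, if pvNonBlank c then max p.2 (p.1 + 1) else p.2)) (0, w)).2) 0

def trim_empty_table_alt (rows : List (List String)) : List (List String) :=
  let rows1 := rows.take (pvNRows rows)          -- `del rows[nrows:]`
  if rows1.isEmpty then rows1
  else
    let w := pvWidth rows1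
    rows1.map (fun row => row.take w ++ List.replicate (w - row.length) "")  -- `row[:] = row[:w] + [""]*(w-len(row))`

-- ===== PRECONDITION & SPEC =====
def Spec_trim_empty_table (rows : List (List String)) (out : List (List String)) : Prop := out = trim_empty_table_alt rows
instance (rows : List (List String)) (out : List (List String)) : Decidable (Spec_trim_empty_table rows out) := by unfold Spec_trim_empty_table; infer_instance

-- ===== CLAIM (what is proved, stated in full; the proofs are below) =====
def Claim_equal_trim_empty_table : Prop := ∀ (rows : List (List String)), Dom_trim_empty_table rows → Spec_trim_empty_table rows (trim_empty_table rows)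

-- ===== LEMMAS AND PROOFS =====

-- the trimmed table both programs produce first: drop trailing blank rows
def pvT (rows : List (List String)) : List (List String) := (rows.reverse.dropWhile pvBlankRow).reverse
-- effective width of one row: 1 + last non-blank index (0 if none)
def pvWOf (r : List String) : Nat := (r.reverse.dropWhile (fun c => PySem.Str.strip c == "")).length
-- effective width of the table
def pvW (rows : List (List String)) : Nat := rows.foldl (fun w r => max w (pvWOf r)) 0

theorem any_nonblank (r : List String) : r.any pvNonBlank = !pvBlankRow r := by
  induction r with
  | nil => simp [pvBlankRow]
  | cons c r ih =>
    cases h : (PySem.Str.strip c == "") <;>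
      simp [pvBlankRow, pvNonBlank, List.any_cons, List.all_cons, h, bne, ih] <;>
      simp [pvBlankRow] at ih ⊢ <;> simp [ih]

theorem trimA_nil : pvTrimRowsA [] = [] := by rw [pvTrimRowsA]; simp

theorem trimA_concat (xs : List (List String)) (x : List String) :
    pvTrimRowsA (xs ++ [x]) = if pvBlankRow x then pvTrimRowsA xs else xs ++ [x] := by
  rw [pvTrimRowsA]; simp [List.getLastD_concat, List.dropLast_concat]

theorem pvT_nil : pvT [] = [] := by simp [pvT]

theorem pvT_concat (xs : List (List String)) (x : List String) :
    pvT (xs ++ [x]) = if pvBlankRow x then pvT xs else xs ++ [x] := by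
  cases h : pvBlankRow x <;> simp [pvT, List.dropWhile_cons, h]

theorem trimA_eq (rows : List (List String)) : pvTrimRowsA rows = pvT rows := by
  induction rows using List.reverseRecOn with
  | nil => simp [trimA_nil, pvT_nil]
  | append_singleton xs x ih => rw [trimA_concat, pvT_concat]; cases pvBlankRow x <;> simp [ih]

theorem nrowsAux_fst (rows : List (List String)) (i n : Nat) :
    (rows.foldl (fun (p : Nat × Nat) row =>
      (p.1 + 1, if row.any pvNonBlank then p.1 + 1 else p.2)) (i, n)).1 = i + rows.length := by
  induction rows generalizing i n with
  | nil => simp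
  | cons r l ih => simp only [List.foldl_cons]; rw [ih]; simp only [List.length_cons]; omega

theorem nrows_concat (xs : List (List String)) (x : List String) :
    pvNRows (xs ++ [x]) = if pvBlankRow x then pvNRows xs else xs.length + 1 := by
  have hf := nrowsAux_fst xs 0 0
  simp only [pvNRows, List.foldl_append, List.foldl_cons, List.foldl_nil]
  rw [any_nonblank x]
  cases pvBlankRow x with
  | true =>
    rw [if_pos rfl]
    simp only [Bool.not_true, if_neg Bool.false_ne_true]
  | false =>
    rw [if_neg Bool.false_ne_true]
    simp only [Bool.not_false, if_pos rfl, hf]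
    simp

theorem nrows_le (rows : List (List String)) : pvNRows rows ≤ rows.length := by
  induction rows using List.reverseRecOn with
  | nil => simp [pvNRows]
  | append_singleton xs x ih =>
    rw [nrows_concat]; cases pvBlankRow x <;> simp <;> omega

theorem take_nrows (rows : List (List String)) : rows.take (pvNRows rows) = pvT rows := by
  induction rows using List.reverseRecOn with
  | nil => simp [pvNRows, pvT_nil]
  | append_singleton xs x ih =>
    rw [nrows_concat, pvT_concat]
    cases pvBlankRow x with
    | false => simp
    | true => simp [List.take_append_of_le_length (nrows_le xs), ih]

theorem wOf_concat (r : List String) (c : String) :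
    pvWOf (r ++ [c]) = if PySem.Str.strip c == "" then pvWOf r else r.length + 1 := by
  cases h : (PySem.Str.strip c == "") <;> simp [pvWOf, List.dropWhile_cons, h]

theorem wOf_le (r : List String) : pvWOf r ≤ r.length := by
  have := List.dropWhile_sublist (l := r.reverse) (p := fun c => PySem.Str.strip c == "")
  have := this.length_le
  simpa [pvWOf] using this

theorem innerAux_fst (r : List String) (i n : Nat) :
    (r.foldl (fun (p : Nat × Nat) c =>
      (p.1 + 1, if pvNonBlank c then max p.2 (p.1 + 1) else p.2)) (i, n)).1 = i + r.length := by
  induction r generalizing i n with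
  | nil => simp
  | cons c l ih => simp only [List.foldl_cons]; rw [ih]; simp only [List.length_cons]; omega

theorem inner_eq (r : List String) (w : Nat) :
    (r.foldl (fun (p : Nat × Nat) c =>
      (p.1 + 1, if pvNonBlank c then max p.2 (p.1 + 1) else p.2)) (0, w)).2 = max w (pvWOf r) := by
  induction r using List.reverseRecOn with
  | nil => simp [pvWOf]
  | append_singleton xs x ih =>
    have hle := wOf_le xs
    have hf := innerAux_fst xs 0 w
    simp only [List.foldl_append, List.foldl_cons, List.foldl_nil]
    rw [wOf_concat, show pvNonBlank x = !(PySem.Str.strip x == "") from by simp [pvNonBlank, bne]]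
    cases h : (PySem.Str.strip x == "") with
    | true =>
      rw [if_pos rfl]
      simp only [Bool.not_true, if_neg Bool.false_ne_true, ih]
    | false =>
      rw [if_neg Bool.false_ne_true]
      simp only [Bool.not_false, if_pos rfl, ih, hf]
      simp
      omega

theorem width_eq (rows : List (List String)) : pvWidth rows = pvW rows := by
  simp only [pvWidth, pvW, inner_eq]

theorem foldlW_init (l : List (List String)) (a : Nat) :
    l.foldl (fun w r => max w (pvWOf r)) a = max a (l.foldl (fun w r => max w (pvWOf r)) 0) := by
  induction l generalizing a with
  | nil => simp
  | cons r l ih =>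
    simp only [List.foldl_cons]
    rw [ih (max a (pvWOf r)), ih (max 0 (pvWOf r))]
    omega

theorem pvW_cons (r : List String) (l : List (List String)) :
    pvW (r :: l) = max (pvWOf r) (pvW l) := by
  simp only [pvW, List.foldl_cons]
  rw [foldlW_init]
  omega

theorem le_pvW (rows : List (List String)) (r : List String) (h : r ∈ rows) :
    pvWOf r ≤ pvW rows := by
  induction rows with
  | nil => simp at h
  | cons x l ih =>
    rw [pvW_cons]
    rcases List.mem_cons.1 h with h | h
    · subst h; omega
    · have := ih h; omega

theorem pvW_le (rows : List (List String)) (m : Nat) (h : ∀ r ∈ rows, pvWOf r ≤ m) :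
    pvW rows ≤ m := by
  induction rows with
  | nil => simp [pvW]
  | cons x l ih =>
    rw [pvW_cons]
    have := h x (by simp)
    have := ih (fun r hr => h r (by simp [hr]))
    omega

theorem pvW_map_congr (rows : List (List String)) (f : List String → List String)
    (h : ∀ r ∈ rows, pvWOf (f r) = pvWOf r) : pvW (rows.map f) = pvW rows := by
  induction rows with
  | nil => rfl
  | cons x l ih =>
    simp only [List.map_cons, pvW_cons]
    rw [h x (by simp), ih (fun r hr => h r (by simp [hr]))]

theorem getD_concat_length (xs : List String) (x : String) :
    (xs ++ [x]).getD xs.length "" = x := by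
  simp [List.getD, List.getElem?_concat_length]

theorem colLoop_eq (n : Nat) (rows : List (List String)) (h : ∀ r ∈ rows, r.length = n) :
    pvColLoop n rows = rows.map (List.take (pvW rows)) := by
  induction n generalizing rows with
  | zero =>
    rw [show pvColLoop 0 rows = rows from rfl]
    conv_lhs => rw [← List.map_id rows]
    apply List.map_congr_left
    intro r hr
    have : r = [] := List.length_eq_zero_iff.1 (h r hr)
    simp [this]
  | succ n ih =>
    rw [show pvColLoop (n + 1) rows
        = (if rows.all (fun row => PySem.Str.strip (row.getD n "") == "") then
            pvColLoop n (rows.map List.dropLast) else rows) from rfl]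
    -- decompose each row as xs ++ [x]
    have hdec : ∀ r ∈ rows, ∃ xs x, r = xs ++ [x] ∧ xs.length = n := by
      intro r hr
      have hne : r ≠ [] := by
        intro e; have := h r hr; simp [e] at this
      refine ⟨r.dropLast, r.getLast hne, (List.dropLast_append_getLast hne).symm, ?_⟩
      have := h r hr; simp [List.length_dropLast, this]
    cases hc : rows.all (fun row => PySem.Str.strip (row.getD n "") == "") with
    | true =>
      simp only [if_pos rfl]
      -- every row's last cell is blank
      have hblank : ∀ r ∈ rows, (PySem.Str.strip (r.getD n "") == "") = true :=
        fun r hr => List.all_eq_true.1 hc r hr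
      have hlen' : ∀ r ∈ rows.map List.dropLast, r.length = n := by
        intro r hr
        rcases List.mem_map.1 hr with ⟨s, hs, rfl⟩
        have := h s hs; simp [List.length_dropLast, this]
      rw [ih _ hlen']
      have hwof : ∀ r ∈ rows, pvWOf r.dropLast = pvWOf r := by
        intro r hr
        rcases hdec r hr with ⟨xs, x, rfl, hxl⟩
        have hb := hblank _ hr
        rw [← hxl] at hb
        rw [getD_concat_length] at hb
        simp [List.dropLast_concat, wOf_concat, hb]
      have hW : pvW (rows.map List.dropLast) = pvW rows := pvW_map_congr rows _ hwof
      rw [hW, List.map_map]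
      apply List.map_congr_left
      intro r hr
      rcases hdec r hr with ⟨xs, x, rfl, hxl⟩
      have hWn : pvW rows ≤ n := by
        apply pvW_le
        intro s hs
        rcases hdec s hs with ⟨ys, y, rfl, hyl⟩
        have hb := hblank _ hs
        rw [← hyl, getD_concat_length] at hb
        rw [wOf_concat, hb, if_pos rfl]
        have := wOf_le ys; omega
      simp only [Function.comp, List.dropLast_concat]
      rw [List.take_append_of_le_length (by omega)]
    | false =>
      simp only [Bool.false_eq_true, if_false]
      -- some row has a non-blank last cell, so pvW rows = n + 1
      have ⟨r0, hr0, hnb⟩ : ∃ r ∈ rows, ¬ ((PySem.Str.strip (r.getD n "") == "") = true) := by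
        rcases List.all_eq_false.1 hc with ⟨r, hr, hb⟩
        exact ⟨r, hr, hb⟩
      have hge : n + 1 ≤ pvW rows := by
        rcases hdec r0 hr0 with ⟨xs, x, rfl, hxl⟩
        rw [← hxl, getD_concat_length] at hnb
        have : pvWOf (xs ++ [x]) = xs.length + 1 := by
          rw [wOf_concat, if_neg hnb]
        have := le_pvW rows _ hr0
        omega
      conv_lhs => rw [← List.map_id rows]
      apply List.map_congr_left
      intro r hr
      have := h r hr
      rw [List.take_of_length_le (by omega)]
      rfl

theorem strip_empty : (PySem.Str.strip "" == "") = true := by decide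

theorem wOf_pad (r : List String) (k : Nat) : pvWOf (r ++ List.replicate k "") = pvWOf r := by
  induction k with
  | zero => simp
  | succ k ih =>
    rw [List.replicate_succ', ← List.append_assoc, wOf_concat, if_pos strip_empty, ih]

theorem natfold_max_init (l : List Nat) (a : Nat) : l.foldl max a = max a (l.foldl max 0) := by
  induction l generalizing a with
  | nil => simp
  | cons x l ih => simp only [List.foldl_cons]; rw [ih, ih (max 0 x)]; omega

theorem le_foldl_max (l : List Nat) (x : Nat) (h : x ∈ l) : x ≤ l.foldl max 0 := by
  induction l with
  | nil => simp at h
  | cons y l ih =>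
    simp only [List.foldl_cons]
    rw [natfold_max_init]
    rcases List.mem_cons.1 h with h | h
    · subst h; omega
    · have := ih h; omega

theorem take_pad (r : List String) (k W : Nat) (h : W ≤ r.length + k) :
    (r ++ List.replicate k "").take W = r.take W ++ List.replicate (W - r.length) "" := by
  rcases Nat.lt_or_ge r.length W with hlt | hge
  · rw [List.take_append, List.take_replicate, List.take_of_length_le (by omega)]
    have : min (W - r.length) k = W - r.length := by omega
    rw [this]
  · rw [List.take_append_of_le_length hge]
    have : W - r.length = 0 := by omega
    simp [this]

-- ===== VERDICT (by name: the statement is the Claim_ definition above) =====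
theorem trim_empty_table_spec : Claim_equal_trim_empty_table := by
  intro rows _
  unfold Spec_trim_empty_table trim_empty_table trim_empty_table_alt
  simp only [trimA_eq, take_nrows]
  cases hR : (pvT rows).isEmpty with
  | true => simp
  | false =>
    simp only [Bool.false_eq_true, if_false]
    rw [width_eq]
    set R := pvT rows with hRdef
    set mw := (R.map List.length).foldl max 0 with hmw
    have hlen : ∀ r ∈ R, r.length ≤ mw := by
      intro r hr
      exact le_foldl_max _ _ (List.mem_map.2 ⟨r, hr, rfl⟩)
    have hplen : ∀ p ∈ R.map (fun row => row ++ List.replicate (mw - row.length) ""), p.length = mw := by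
      intro p hp
      rcases List.mem_map.1 hp with ⟨r, hr, rfl⟩
      have := hlen r hr
      simp; omega
    rw [colLoop_eq mw _ hplen]
    have hW : pvW (R.map (fun row => row ++ List.replicate (mw - row.length) "")) = pvW R :=
      pvW_map_congr R _ (fun r _ => wOf_pad r _)
    rw [hW, List.map_map]
    apply List.map_congr_left
    intro r hr
    have h1 : r.length ≤ mw := hlen r hr
    have h2 : pvW R ≤ mw := pvW_le R mw (fun s hs => le_trans (wOf_le s) (hlen s hs))
    simp only [Function.comp]
    rw [take_pad _ _ _ (by omega)]
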